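-- pv_equiv track=rewrite | github.com/derrynknife/RePyability | repyability/rbd/min_path_sets.py | minimalise_path_sets
-- ===== SOURCE A (Python) =====
-- def minimalise_path_sets(path_sets: list[set]) -> list[set]:
--     """Returns only the minimal path-sets
--
--     i.e. Discards all path-sets that are a superset of any of the other
--     path-sets.
--
--     Parameters
--     ----------
--     path_sets : list[set]
--         All path-sets to minimalise
--     """
--     minimal_path_sets = []
--     for path_set in path_sets:
--         is_path_set_minimal = True  # Assume path-set is minimal
--         for other_path_set in path_sets:
--             if path_set == other_path_set:
--                 # Don't consider the same path-set
--                 continue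
--             if path_set.issuperset(other_path_set):
--                 # Discard path_set as it's non-minimal (other_path_set is a
--                 # subset of this path_set)
--                 is_path_set_minimal = False
--                 break
--         if is_path_set_minimal:
--             minimal_path_sets.append(path_set)
--     return minimal_path_sets
-- ===== SOURCE B (Python) =====
-- def minimalise_path_sets(path_sets: list[set]) -> list[set]:
--     """Returns only the minimal path-sets (sort-by-size scan)."""
--     n = len(path_sets)
--     order = sorted(range(n), key=lambda i: len(path_sets[i]))
--     minimal_so_far = []
--     keep = []
--     for i in order:
--         s = path_sets[i]
--         if not any(s > m for m in minimal_so_far):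
--             minimal_so_far.append(s)
--             keep.append(i)
--     return [s for i, s in enumerate(path_sets) if i in keep]
-- ===== Notes on version B (the rewrite author's own statement) =====
-- stated objective: alternative
-- what changed: B replaces A's all-pairs superset scan by sorting the sets by cardinality and sweeping once, keeping each set unless it is a proper superset of an already-kept set, then re-emitting the kept sets in original input order.
import Mathlib
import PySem

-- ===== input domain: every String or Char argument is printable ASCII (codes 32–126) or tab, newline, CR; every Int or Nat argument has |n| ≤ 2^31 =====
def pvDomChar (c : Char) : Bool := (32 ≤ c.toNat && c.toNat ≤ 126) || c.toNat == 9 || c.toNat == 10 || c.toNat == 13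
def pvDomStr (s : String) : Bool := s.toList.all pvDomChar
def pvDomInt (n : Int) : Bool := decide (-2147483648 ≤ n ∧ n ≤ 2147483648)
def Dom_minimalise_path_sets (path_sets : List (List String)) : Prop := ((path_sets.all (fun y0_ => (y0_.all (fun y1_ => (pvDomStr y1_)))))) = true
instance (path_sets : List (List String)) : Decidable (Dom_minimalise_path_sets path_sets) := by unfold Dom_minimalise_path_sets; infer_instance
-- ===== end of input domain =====

-- B replaces A's all-pairs scan by a sort-by-cardinality sweep that keeps each set unless it is a
-- proper superset of an already-kept set, then emits the kept sets in original order (objective: alternative).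
-- Inner List String values denote Python sets (distinct elements); all set operations are PySem.Set.

-- ===== PORT A =====
-- inner 'for other_path_set in path_sets' loop with its break
def pvInnerA (x : List String) : List (List String) → Bool
  | [] => true
  | y :: ys =>
      if PySem.Set.equal x y then pvInnerA x ys
      else if PySem.Set.issuperset x y then false
      else pvInnerA x ys

def minimalise_path_sets (path_sets : List (List String)) : List (List String) :=
  path_sets.foldl (fun acc x => if pvInnerA x path_sets then acc ++ [x] else acc) []

-- ===== PORT B =====
-- len(s) of a set-denoting list (the Python value is a set; ofList normalises possible duplicates)
def pvCard (s : List String) : Int := ((PySem.Set.ofList s).length : Int)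

-- Python 's > m' on sets: proper superset
def pvPropSup (s m : List String) : Bool := PySem.Set.issuperset s m && !(PySem.Set.issubset s m)

-- the 'for i, s in pairs' loop of Source B
def pvScanB : List (Int × List String) → List (List String) → List Int → List Int
  | [], _, keep => keep
  | (i, s) :: rest, msf, keep =>
      if msf.any (fun m => pvPropSup s m) then pvScanB rest msf keep
      else pvScanB rest (msf ++ [s]) (keep ++ [i])

def minimalise_path_sets_alt (path_sets : List (List String)) : List (List String) :=
  let pairs := PySem.List.sorted (PySem.List.enumerate path_sets) (fun p => pvCard p.2) false
  let keep := pvScanB pairs [] []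
  (PySem.List.enumerate path_sets).foldl
    (fun acc p => if keep.contains p.1 then acc ++ [p.2] else acc) []

-- ===== PRECONDITION & SPEC =====
def Spec_minimalise_path_sets (path_sets : List (List String)) (out : List (List String)) : Prop := out = minimalise_path_sets_alt path_sets
instance (path_sets : List (List String)) (out : List (List String)) : Decidable (Spec_minimalise_path_sets path_sets out) := by unfold Spec_minimalise_path_sets; infer_instance

-- ===== CLAIM (what is proved, stated in full; the proofs are below) =====
def Claim_equal_minimalise_path_sets : Prop := ∀ (path_sets : List (List String)), Dom_minimalise_path_sets path_sets → Spec_minimalise_path_sets path_sets (minimalise_path_sets path_sets)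

-- ===== LEMMAS AND PROOFS =====

-- x has a proper subset (as sets) among the members of l
def pvHasB (l : List (List String)) (x : List String) : Bool := l.any (fun y => pvPropSup x y)

theorem pvInnerA_eq (x : List String) (ys : List (List String)) :
    pvInnerA x ys = !(ys.any (fun y => pvPropSup x y)) := by
  induction ys with
  | nil => rfl
  | cons y ys ih =>
      simp only [pvInnerA, List.any_cons]
      by_cases he : PySem.Set.equal x y = true
      · have hsub : PySem.Set.issubset x y = true := by
          rw [PySem.Set.issubset_iff]
          intro a ha
          exact ((PySem.Set.equal_iff x y).1 he a).1 ha
        simp [he, ih, pvPropSup, hsub]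
      · by_cases hsup : PySem.Set.issuperset x y = true
        · have hns : PySem.Set.issubset x y = false := by
            cases hxy : PySem.Set.issubset x y
            · rfl
            · exact absurd (by
                rw [PySem.Set.equal_iff]
                intro a
                exact ⟨fun ha => (PySem.Set.issubset_iff x y).1 hxy a ha,
                       fun ha => (PySem.Set.issuperset_iff x y).1 hsup a ha⟩) he
          simp [he, hsup, pvPropSup, hns]
        · have hsup' : PySem.Set.issuperset x y = false := by
            cases h : PySem.Set.issuperset x y
            · rfl
            · exact absurd h hsup
          simp [he, hsup', ih, pvPropSup]

theorem A_filter (l : List (List String)) :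
    minimalise_path_sets l = l.filter (fun x => !pvHasB l x) := by
  unfold minimalise_path_sets
  have hp : (fun x => pvInnerA x l) = (fun x => !pvHasB l x) :=
    funext fun x => by rw [pvInnerA_eq]; rfl
  have h := PySem.List.foldl_append_if (fun x => pvInnerA x l) id l []
  simp only [id_eq, List.map_id, List.nil_append] at h
  rw [h, hp]

theorem pvPropSup_elim {x y : List String} (h : pvPropSup x y = true) :
    (∀ a ∈ y, a ∈ x) ∧ ¬ (∀ a ∈ x, a ∈ y) := by
  unfold pvPropSup at h
  rw [Bool.and_eq_true, Bool.not_eq_true'] at h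
  refine ⟨(PySem.Set.issuperset_iff x y).1 h.1, fun hall => ?_⟩
  rw [(PySem.Set.issubset_iff x y).2 hall] at h
  exact absurd h.2 (by simp)

theorem pvPropSup_intro {x y : List String} (h1 : ∀ a ∈ y, a ∈ x) (h2 : ¬ (∀ a ∈ x, a ∈ y)) :
    pvPropSup x y = true := by
  unfold pvPropSup
  rw [Bool.and_eq_true, Bool.not_eq_true']
  refine ⟨(PySem.Set.issuperset_iff x y).2 h1, ?_⟩
  cases hs : PySem.Set.issubset x y
  · rfl
  · exact absurd ((PySem.Set.issubset_iff x y).1 hs) h2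

theorem pvCard_ofList_toFinset (z : List String) :
    (PySem.Set.ofList z).length = z.toFinset.card := by
  have h1 : (PySem.Set.ofList z).toFinset = z.toFinset :=
    Finset.ext fun a => by simp [List.mem_toFinset, PySem.Set.mem_ofList]
  rw [← List.toFinset_card_of_nodup (PySem.Set.nodup_ofList z), h1]

-- proper superset is a strict cardinality increase
theorem pvCard_lt {x y : List String} (h : pvPropSup x y = true) : pvCard y < pvCard x := by
  obtain ⟨hsub, hne⟩ := pvPropSup_elim h
  have hFS : y.toFinset ⊆ x.toFinset := fun a ha =>
    List.mem_toFinset.2 (hsub a (List.mem_toFinset.1 ha))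
  have hss : y.toFinset ⊂ x.toFinset := by
    refine ⟨hFS, fun hsup => hne fun a ha => ?_⟩
    exact List.mem_toFinset.1 (hsup (List.mem_toFinset.2 ha))
  have hc := Finset.card_lt_card hss
  unfold pvCard
  rw [pvCard_ofList_toFinset, pvCard_ofList_toFinset]
  exact_mod_cast hc

theorem pvPropSup_trans {x y z : List String} (h1 : pvPropSup x y = true)
    (h2 : pvPropSup y z = true) : pvPropSup x z = true := by
  obtain ⟨h1s, h1n⟩ := pvPropSup_elim h1
  obtain ⟨h2s, _⟩ := pvPropSup_elim h2
  exact pvPropSup_intro (fun a ha => h1s a (h2s a ha))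
    (fun hall => h1n fun a ha => h2s a (hall a ha))

theorem pvPropSup_irrefl (s : List String) : pvPropSup s s = false := by
  cases h : pvPropSup s s
  · rfl
  · exact absurd (fun a ha => ha) (pvPropSup_elim h).2

-- every non-minimal set has a MINIMAL proper subset in l
theorem pvExistsMin (l : List (List String)) :
    ∀ (n : Nat) (x : List String), pvCard x ≤ (n : Int) → pvHasB l x = true →
      ∃ z ∈ l, pvPropSup x z = true ∧ pvHasB l z = false := by
  intro n
  induction n with
  | zero =>
      intro x hn hx
      obtain ⟨y, hy, hxy⟩ := List.any_eq_true.1 hx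
      have h1 := pvCard_lt hxy
      have h0 : (0:Int) ≤ pvCard y := by unfold pvCard; positivity
      omega
  | succ n ih =>
      intro x hn hx
      obtain ⟨y, hy, hxy⟩ := List.any_eq_true.1 hx
      cases hhy : pvHasB l y
      · exact ⟨y, hy, hxy, hhy⟩
      · have hlt := pvCard_lt hxy
        obtain ⟨z, hz, hyz, hhz⟩ := ih y (by omega) hhy
        exact ⟨z, hz, pvPropSup_trans hxy hyz, hhz⟩

theorem pvEnumSndEq {xs : List (List String)} {i : Int} {a b : List String}
    (ha : (i, a) ∈ PySem.List.enumerate xs 0) (hb : (i, b) ∈ PySem.List.enumerate xs 0) :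
    a = b := by
  rw [PySem.List.mem_enumerate_iff] at ha hb
  obtain ⟨k, hk, hek⟩ := ha
  obtain ⟨k', hk', hek'⟩ := hb
  rw [Prod.mk.injEq] at hek hek'
  have hkk : k = k' := by omega
  subst hkk
  rw [hek.2, hek'.2]

theorem pvScan_spec (l : List (List String)) (pairs : List (Int × List String))
    (hperm : pairs.Perm (PySem.List.enumerate l))
    (hsort : pairs.Pairwise (fun a b => pvCard a.2 ≤ pvCard b.2)) :
    ∀ (todo done : List (Int × List String)), pairs = done ++ todo →
      pvScanB todo ((done.map Prod.snd).filter (fun s => !pvHasB l s))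
          ((done.filter (fun p => !pvHasB l p.2)).map Prod.fst)
        = (pairs.filter (fun p => !pvHasB l p.2)).map Prod.fst := by
  intro todo
  induction todo with
  | nil =>
      intro done hd
      rw [hd, List.append_nil]
      rfl
  | cons p rest ih =>
      intro done hd
      obtain ⟨i, s⟩ := p
      have hcond : ((done.map Prod.snd).filter (fun s' => !pvHasB l s')).any
          (fun m => pvPropSup s m) = pvHasB l s := by
        cases hh : pvHasB l s
        · rw [List.any_eq_false]
          intro m hm hms
          have hmd := (List.mem_filter.1 hm).1
          obtain ⟨q, hq, hqm⟩ := List.mem_map.1 hmd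
          have hql : q ∈ PySem.List.enumerate l 0 :=
            hperm.mem_iff.1 (hd ▸ List.mem_append_left _ hq)
          rw [PySem.List.mem_enumerate_iff] at hql
          obtain ⟨k, hk, hqe⟩ := hql
          have hml : m ∈ l := by
            rw [← hqm, hqe]
            exact List.getElem_mem hk
          have : pvHasB l s = true := List.any_eq_true.2 ⟨m, hml, hms⟩
          rw [hh] at this
          exact Bool.false_ne_true this
        · obtain ⟨z, hzl, hzs, hzmin⟩ :=
            pvExistsMin l (PySem.Set.ofList s).length s (by unfold pvCard; omega) hh
          obtain ⟨k, hk, hkz⟩ := List.getElem_of_mem hzl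
          have hze : ((k : Int), z) ∈ PySem.List.enumerate l 0 := by
            rw [PySem.List.mem_enumerate_iff]
            exact ⟨k, hk, by simp [hkz]⟩
          have hzp : ((k : Int), z) ∈ pairs := hperm.mem_iff.2 hze
          rw [hd] at hzp
          rcases List.mem_append.1 hzp with hdone | hrest
          · rw [List.any_eq_true]
            refine ⟨z, List.mem_filter.2 ⟨List.mem_map.2 ⟨((k : Int), z), hdone, rfl⟩, ?_⟩, hzs⟩
            rw [hzmin]
            rfl
          · rcases List.mem_cons.1 hrest with heq | hmem
            · have hzs' : z = s := congrArg Prod.snd heq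
              rw [hzs'] at hzs
              rw [pvPropSup_irrefl] at hzs
              exact absurd hzs Bool.false_ne_true
            · have hpw : ((i, s) :: rest).Pairwise (fun a b => pvCard a.2 ≤ pvCard b.2) :=
                (List.pairwise_append.1 (hd ▸ hsort)).2.1
              have hle := (List.pairwise_cons.1 hpw).1 _ hmem
              have hlt := pvCard_lt hzs
              simp only at hle
              omega
      simp only [pvScanB]
      rw [hcond]
      cases hh : pvHasB l s
      · have h2 := ih (done ++ [(i, s)]) (by rw [hd]; simp)
        simp only [List.map_append, List.filter_append, List.map_cons, List.map_nil,
          List.filter_cons, List.filter_nil, hh] at h2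
        simpa [hh] using h2
      · have h2 := ih (done ++ [(i, s)]) (by rw [hd]; simp)
        simp only [List.map_append, List.filter_append, List.map_cons, List.map_nil,
          List.filter_cons, List.filter_nil, hh] at h2
        simpa [hh] using h2

theorem pvEnumFilter (g : Int × List String → Bool) (f : List String → Bool) :
    ∀ (xs : List (List String)) (s : Int),
      (∀ p ∈ PySem.List.enumerate xs s, g p = f p.2) →
      ((PySem.List.enumerate xs s).filter g).map Prod.snd = xs.filter f := by
  intro xs
  induction xs with
  | nil => intro s _; rfl
  | cons x xs ih =>
      intro s h
      rw [PySem.List.enumerate_cons] at h ⊢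
      have hx : g (s, x) = f x := h (s, x) List.mem_cons_self
      have ihr := ih (s + 1) fun p hp => h p (List.mem_cons_of_mem _ hp)
      cases hfx : f x <;>
        simp [hx, hfx, ihr]

theorem B_filter (l : List (List String)) :
    minimalise_path_sets_alt l = l.filter (fun x => !pvHasB l x) := by
  unfold minimalise_path_sets_alt
  simp only []
  have hperm := PySem.List.sorted_perm (PySem.List.enumerate l) (fun p => pvCard p.2) false
  have hsort := PySem.List.sorted_pairwise (PySem.List.enumerate l) (fun p => pvCard p.2)
  have hkeep := pvScan_spec l _ hperm hsort
      (PySem.List.sorted (PySem.List.enumerate l) (fun p => pvCard p.2) false) [] rfl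
  simp only [List.map_nil, List.filter_nil] at hkeep
  rw [hkeep]
  have h := PySem.List.foldl_append_if
      (fun p : Int × List String =>
        ((PySem.List.sorted (PySem.List.enumerate l) (fun p => pvCard p.2) false).filter
            (fun p => !pvHasB l p.2)).map Prod.fst |>.contains p.1)
      Prod.snd (PySem.List.enumerate l) []
  simp only [List.nil_append] at h
  rw [h]
  apply pvEnumFilter
  intro p hp
  obtain ⟨i, s⟩ := p
  have hps : ∀ q ∈ PySem.List.sorted (PySem.List.enumerate l) (fun p => pvCard p.2) false,
      q ∈ PySem.List.enumerate l 0 := fun q hq => hperm.mem_iff.1 hq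
  cases hv : pvHasB l s
  · have hmem : i ∈ ((PySem.List.sorted (PySem.List.enumerate l) (fun p => pvCard p.2) false).filter
        (fun p => !pvHasB l p.2)).map Prod.fst :=
      List.mem_map.2 ⟨(i, s), List.mem_filter.2
        ⟨(PySem.List.mem_sorted _ _ _ _).2 hp, by rw [hv]; rfl⟩, rfl⟩
    simpa [List.contains_iff_mem] using hmem
  · have hnmem : i ∉ ((PySem.List.sorted (PySem.List.enumerate l) (fun p => pvCard p.2) false).filter
        (fun p => !pvHasB l p.2)).map Prod.fst := by
      intro hmem
      obtain ⟨q, hq, hq1⟩ := List.mem_map.1 hmem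
      have hqf := List.mem_filter.1 hq
      have hqe : q ∈ PySem.List.enumerate l 0 := hps q hqf.1
      obtain ⟨i', s'⟩ := q
      have hii : i' = i := hq1
      rw [hii] at hqe
      have hss : s' = s := pvEnumSndEq hqe hp
      rw [hss] at hqf
      have h2 := hqf.2
      rw [hv] at h2
      exact absurd h2 (by simp)
    simpa [List.contains_iff_mem] using hnmem

-- ===== VERDICT (by name: the statement is the Claim_ definition above) =====
theorem minimalise_path_sets_spec : Claim_equal_minimalise_path_sets := by
  intro l _
  unfold Spec_minimalise_path_sets
  rw [A_filter, B_filter]
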